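-- pv_equiv track=rewrite | github.com/SamGarciaPereira/PUCPR | 3p/SegurancaDaInformacao/criptografia/jc.py | cripto
-- ===== SOURCE A (Python) =====
-- def cripto(mensagem, chave):
--     cripto = ""
--     for c in mensagem:
--         codigo = ord(c) + chave
--         # Mantém no intervalo de caracteres imprimíveis
--         while codigo < 32:
--             codigo += 95
--         while codigo > 126:
--             codigo -= 95
--         cripto += chr(codigo)
--     return cripto
-- ===== SOURCE B (Python) =====
-- def cripto(mensagem, chave):
--     table = {ord(c): 32 + (ord(c) + chave - 32) % 95 for c in set(mensagem)}
--     return mensagem.translate(table)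
-- ===== Notes on version B (the rewrite author's own statement) =====
-- stated objective: idiomatic
-- what changed: B precomputes a translation table over the distinct characters using the closed-form modulo 32+(ord(c)+chave-32)%95 and applies it in one str.translate pass, replacing A's per-occurrence while-loop wrapping.
import Mathlib
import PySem

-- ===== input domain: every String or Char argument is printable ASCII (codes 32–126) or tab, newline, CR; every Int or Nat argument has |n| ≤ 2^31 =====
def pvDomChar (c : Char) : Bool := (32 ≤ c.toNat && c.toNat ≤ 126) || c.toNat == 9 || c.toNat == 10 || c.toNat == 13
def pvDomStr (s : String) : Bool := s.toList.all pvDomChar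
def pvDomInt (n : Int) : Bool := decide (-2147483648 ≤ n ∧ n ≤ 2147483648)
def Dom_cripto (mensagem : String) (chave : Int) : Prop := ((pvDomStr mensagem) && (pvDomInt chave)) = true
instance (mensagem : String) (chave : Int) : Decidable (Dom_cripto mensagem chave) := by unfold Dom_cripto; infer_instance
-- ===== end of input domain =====

-- B replaces A's per-character while-loop wrapping by a translation table over the distinct
-- characters (modulo arithmetic) plus one translate pass; same return value on every input.

-- ===== PORT A =====
-- 'while codigo < 32: codigo += 95'  (structural recursion on a fuel bound that merely
-- makes the same loop total: (32 - x).toNat + 1 steps always suffice)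
def pvWrapUpAux : Nat → Int → Int
  | 0, x => x
  | n + 1, x => if x < 32 then pvWrapUpAux n (x + 95) else x

def pvWrapUp (x : Int) : Int := pvWrapUpAux ((32 - x).toNat + 1) x

-- 'while codigo > 126: codigo -= 95'  (fuel likewise)
def pvWrapDownAux : Nat → Int → Int
  | 0, x => x
  | n + 1, x => if 126 < x then pvWrapDownAux n (x - 95) else x

def pvWrapDown (x : Int) : Int := pvWrapDownAux ((x - 126).toNat + 1) x

def cripto (mensagem : String) (chave : Int) : String :=
  String.ofList (mensagem.toList.foldl
    (fun acc c => acc ++ [Char.ofNat (pvWrapDown (pvWrapUp ((c.toNat : Int) + chave))).toNat])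
    ([] : List Char))

-- ===== PORT B =====
-- table = {ord(c): 32 + (ord(c) + chave - 32) % 95 for c in set(mensagem)}
-- (the dict is only looked up afterwards and the value depends only on the key,
--  so Python's set-iteration order cannot affect the result)
def pvTable (mensagem : String) (chave : Int) : PySem.Dict Int Int :=
  (PySem.Set.ofList mensagem.toList).foldl
    (fun d c => d.insert (c.toNat : Int) (32 + PySem.Int.mod ((c.toNat : Int) + chave - 32) 95))
    PySem.Dict.empty

-- mensagem.translate(table): a char maps to chr(table[ord(c)]) if present, else stays
def cripto_alt (mensagem : String) (chave : Int) : String :=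
  String.ofList (mensagem.toList.map (fun c =>
    match (pvTable mensagem chave).get? (c.toNat : Int) with
    | some v => Char.ofNat v.toNat
    | none => c))

-- ===== PRECONDITION & SPEC =====
def Spec_cripto (mensagem : String) (chave : Int) (out : String) : Prop := out = cripto_alt mensagem chave
instance (mensagem : String) (chave : Int) (out : String) : Decidable (Spec_cripto mensagem chave out) := by unfold Spec_cripto; infer_instance

-- ===== CLAIM (what is proved, stated in full; the proofs are below) =====
def Claim_equal_cripto : Prop := ∀ (mensagem : String) (chave : Int), Dom_cripto mensagem chave → Spec_cripto mensagem chave (cripto mensagem chave)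

-- ===== LEMMAS AND PROOFS =====

theorem pvWrapUpAux_spec (n : Nat) : ∀ x : Int, (32 - x).toNat < n →
    32 ≤ pvWrapUpAux n x ∧ pvWrapUpAux n x % 95 = x % 95 := by
  induction n with
  | zero => intro x h; omega
  | succ n ih =>
    intro x h
    rw [pvWrapUpAux]
    split
    · have := ih (x + 95) (by omega); omega
    · omega

theorem pvWrapUp_spec (x : Int) : 32 ≤ pvWrapUp x ∧ pvWrapUp x % 95 = x % 95 :=
  pvWrapUpAux_spec _ x (by omega)

theorem pvWrapDownAux_spec (n : Nat) : ∀ x : Int, 32 ≤ x → (x - 126).toNat < n →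
    32 ≤ pvWrapDownAux n x ∧ pvWrapDownAux n x ≤ 126 ∧ pvWrapDownAux n x % 95 = x % 95 := by
  induction n with
  | zero => intro x _ h; omega
  | succ n ih =>
    intro x hx h
    rw [pvWrapDownAux]
    split
    · have := ih (x - 95) (by omega) (by omega); omega
    · omega

theorem pvWrapDown_spec (x : Int) (h : 32 ≤ x) :
    32 ≤ pvWrapDown x ∧ pvWrapDown x ≤ 126 ∧ pvWrapDown x % 95 = x % 95 :=
  pvWrapDownAux_spec _ x h (by omega)

theorem pvWrap_closed (x : Int) : pvWrapDown (pvWrapUp x) = 32 + (x - 32) % 95 := by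
  obtain ⟨h1, h2⟩ := pvWrapUp_spec x
  obtain ⟨h3, h4, h5⟩ := pvWrapDown_spec (pvWrapUp x) h1
  omega

theorem pvTable_get (k : Int) (l : List Char) (d : PySem.Dict Int Int) (c : Char)
    (h : c ∈ l ∨ d.get? (c.toNat : Int)
        = some (32 + PySem.Int.mod ((c.toNat : Int) + k - 32) 95)) :
    (l.foldl (fun d c => d.insert (c.toNat : Int)
        (32 + PySem.Int.mod ((c.toNat : Int) + k - 32) 95)) d).get? (c.toNat : Int)
      = some (32 + PySem.Int.mod ((c.toNat : Int) + k - 32) 95) := by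
  induction l generalizing d with
  | nil =>
    simp only [List.foldl_nil]
    rcases h with h | h
    · cases h
    · exact h
  | cons a t ih =>
    simp only [List.foldl_cons]
    apply ih
    by_cases hc : (c.toNat : Int) = (a.toNat : Int)
    · right; rw [hc, PySem.Dict.get?_insert_self, ← hc]
    · rcases h with h | h
      · rcases List.mem_cons.mp h with h | h
        · exact absurd (by rw [h]) hc
        · left; exact h
      · right; rw [PySem.Dict.get?_insert_of_ne _ _ hc]; exact h

theorem cripto_eq (mensagem : String) (chave : Int) :
    cripto mensagem chave = cripto_alt mensagem chave := by
  unfold cripto cripto_alt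
  rw [PySem.List.foldl_append_singleton_eq_map]
  congr 1
  apply List.map_congr_left
  intro c hc
  have hmem : c ∈ PySem.Set.ofList mensagem.toList := (PySem.Set.mem_ofList _ _).mpr hc
  rw [pvTable, pvTable_get chave _ _ c (Or.inl hmem)]
  have hmod : PySem.Int.mod ((c.toNat : Int) + chave - 32) 95
      = ((c.toNat : Int) + chave - 32) % 95 :=
    PySem.Int.mod_eq_emod_of_pos (by norm_num)
  rw [hmod, pvWrap_closed]

-- ===== VERDICT (by name: the statement is the Claim_ definition above) =====
theorem cripto_spec : Claim_equal_cripto := by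
  intro mensagem chave _
  exact cripto_eq mensagem chave
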